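-- pv_equiv track=rewrite | github.com/marcusjoshm/percell3 | src/percell4/cli/menu_system.py | _colorize_banner_line
-- ===== SOURCE A (Python) =====
-- def _colorize_banner_line(line: str) -> str:
--     """Color a banner line: cyan microscope, green PER, magenta CELL."""
--     parts = []
--     for j, char in enumerate(line):
--         if char == " ":
--             parts.append(char)
--         elif j <= 10:
--             parts.append(f"[cyan]{char}[/cyan]")
--         elif j <= 39:
--             parts.append(f"[green]{char}[/green]")
--         else:
--             parts.append(f"[magenta]{char}[/magenta]")
--     return "".join(parts)
-- ===== SOURCE B (Python) =====
-- def _wrap_segment(segment: str, color: str) -> str: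
--     opening = f"[{color}]"
--     closing = f"[/{color}]"
--     return "".join(c if c == " " else opening + c + closing for c in segment)
--
--
-- def _colorize_banner_line(line: str) -> str:
--     """Color a banner line: cyan microscope, green PER, magenta CELL."""
--     return (
--         _wrap_segment(line[:11], "cyan")
--         + _wrap_segment(line[11:40], "green")
--         + _wrap_segment(line[40:], "magenta")
--     )
-- ===== Notes on version B (the rewrite author's own statement) =====
-- stated objective: simpler
-- what changed: Replaced the per-character enumerate loop with position comparisons by slicing the line into the three fixed color ranges up front and wrapping each slice uniformly with one small helper.
import Mathlib
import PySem

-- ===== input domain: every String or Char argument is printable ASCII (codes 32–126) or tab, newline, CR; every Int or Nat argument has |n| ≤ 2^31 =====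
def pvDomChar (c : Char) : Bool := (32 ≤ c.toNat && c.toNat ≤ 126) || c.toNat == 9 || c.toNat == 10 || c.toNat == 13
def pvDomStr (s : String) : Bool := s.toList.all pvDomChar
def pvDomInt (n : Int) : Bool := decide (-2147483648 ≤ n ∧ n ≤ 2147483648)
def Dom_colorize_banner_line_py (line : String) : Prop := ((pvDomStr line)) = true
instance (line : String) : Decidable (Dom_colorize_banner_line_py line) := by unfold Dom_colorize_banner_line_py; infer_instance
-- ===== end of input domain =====

-- B slices the line into the three fixed color ranges up front and wraps each slice uniformly with a helper (objective: simpler).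


-- ===== PORT A =====
-- loop 'for j, char in enumerate(line): parts.append(…)' with the branch chain, then '"".join(parts)'
def colorize_banner_line_py (line : String) : String :=
  String.join ((PySem.List.enumerate line.toList 0).map fun jc =>
    if jc.2 = ' ' then String.ofList [jc.2]
    else if jc.1 ≤ 10 then "[cyan]" ++ String.ofList [jc.2] ++ "[/cyan]"
    else if jc.1 ≤ 39 then "[green]" ++ String.ofList [jc.2] ++ "[/green]"
    else "[magenta]" ++ String.ofList [jc.2] ++ "[/magenta]")

-- ===== PORT B =====
-- helper _wrap_segment(segment, color): precompute the two tags, wrap every non-space char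
def pvWrapSegment (seg : List Char) (color : String) : String :=
  let opening := "[" ++ color ++ "]"
  let closing := "[/" ++ color ++ "]"
  String.join (seg.map fun c =>
    if c = ' ' then String.ofList [c] else opening ++ String.ofList [c] ++ closing)

-- line[:11], line[11:40], line[40:] via PySem slices on the character list
def colorize_banner_line_py_alt (line : String) : String :=
  pvWrapSegment (PySem.List.slice line.toList none (some 11)) "cyan" ++
  pvWrapSegment (PySem.List.slice line.toList (some 11) (some 40)) "green" ++
  pvWrapSegment (PySem.List.slice line.toList (some 40) none) "magenta"

-- ===== PRECONDITION & SPEC =====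
def Spec_colorize_banner_line_py (line : String) (out : String) : Prop := out = colorize_banner_line_py_alt line
instance (line : String) (out : String) : Decidable (Spec_colorize_banner_line_py line out) := by unfold Spec_colorize_banner_line_py; infer_instance

-- ===== CLAIM (what is proved, stated in full; the proofs are below) =====
def Claim_equal_colorize_banner_line_py : Prop := ∀ (line : String), Dom_colorize_banner_line_py line → Spec_colorize_banner_line_py line (colorize_banner_line_py line)

-- ===== LEMMAS AND PROOFS =====

-- joining a map over an enumeration whose entries are index-independent equals joining a map over the list
theorem pv_join_map_enum {α : Type} (xs : List α) (s : Int) (g : Int × α → String) (g' : α → String)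
    (h : ∀ (k : Nat) (hk : k < xs.length), g (s + k, xs[k]) = g' xs[k]) :
    String.join ((PySem.List.enumerate xs s).map g) = String.join (xs.map g') := by
  have h1 : (PySem.List.enumerate xs s).map g
      = (PySem.List.enumerate xs s).map (fun p => g' p.2) := by
    apply List.map_congr_left
    intro p hp
    rw [PySem.List.mem_enumerate_iff] at hp
    obtain ⟨k, hk, rfl⟩ := hp
    exact h k hk
  rw [h1]
  have h2 : (fun p : Int × α => g' p.2) = g' ∘ Prod.snd := rfl
  rw [h2, ← List.map_map, PySem.List.map_snd_enumerate]

theorem pv_foldl_str (xs : List String) (a : String) :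
    xs.foldl (fun r s => r ++ s) a = a ++ xs.foldl (fun r s => r ++ s) "" := by
  induction xs generalizing a with
  | nil => simp
  | cons x xs ih =>
      simp only [List.foldl_cons]
      have hx : ("" : String) ++ x = x := by simp
      rw [ih (a ++ x), ih ("" ++ x), hx, String.append_assoc]

theorem pv_join_append (a b : List String) :
    String.join (a ++ b) = String.join a ++ String.join b := by
  simp only [String.join, List.foldl_append]
  exact pv_foldl_str b _

-- ===== VERDICT (by name: the statement is the Claim_ definition above) =====
theorem colorize_banner_line_py_spec : Claim_equal_colorize_banner_line_py := by
  intro line _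
  unfold Spec_colorize_banner_line_py colorize_banner_line_py colorize_banner_line_py_alt
  set l := line.toList with hl
  have hslice1 : PySem.List.slice l none (some 11) = l.take 11 := by
    rw [PySem.List.slice_to l (by norm_num)]; rfl
  have hslice2 : PySem.List.slice l (some 11) (some 40) = (l.drop 11).take 29 := by
    rw [PySem.List.slice_toNat l (by norm_num) (by norm_num)]; rfl
  have hslice3 : PySem.List.slice l (some 40) none = (l.drop 11).drop 29 := by
    rw [PySem.List.slice_from l (by norm_num)]
    simp [List.drop_drop]
  rw [hslice1, hslice2, hslice3]
  have hdecomp : l = l.take 11 ++ ((l.drop 11).take 29 ++ (l.drop 11).drop 29) := by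
    rw [List.take_append_drop, List.take_append_drop]
  have e1 : String.join ((PySem.List.enumerate (l.take 11) 0).map fun jc =>
        if jc.2 = ' ' then String.ofList [jc.2]
        else if jc.1 ≤ 10 then "[cyan]" ++ String.ofList [jc.2] ++ "[/cyan]"
        else if jc.1 ≤ 39 then "[green]" ++ String.ofList [jc.2] ++ "[/green]"
        else "[magenta]" ++ String.ofList [jc.2] ++ "[/magenta]")
      = pvWrapSegment (l.take 11) "cyan" := by
    rw [pv_join_map_enum (l.take 11) 0 _
        (fun c => if c = ' ' then String.ofList [c]
                  else "[cyan]" ++ String.ofList [c] ++ "[/cyan]")]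
    · unfold pvWrapSegment
      congr 1
    · intro k hk
      have hk11 : k < 11 := by simp only [List.length_take] at hk; omega
      have : (0 : Int) + k ≤ 10 := by omega
      simp only [this, if_true]
  have e2 : String.join ((PySem.List.enumerate ((l.drop 11).take 29) (0 + (l.take 11).length)).map fun jc =>
        if jc.2 = ' ' then String.ofList [jc.2]
        else if jc.1 ≤ 10 then "[cyan]" ++ String.ofList [jc.2] ++ "[/cyan]"
        else if jc.1 ≤ 39 then "[green]" ++ String.ofList [jc.2] ++ "[/green]"
        else "[magenta]" ++ String.ofList [jc.2] ++ "[/magenta]")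
      = pvWrapSegment ((l.drop 11).take 29) "green" := by
    rw [pv_join_map_enum _ _ _
        (fun c => if c = ' ' then String.ofList [c]
                  else "[green]" ++ String.ofList [c] ++ "[/green]")]
    · unfold pvWrapSegment
      congr 1
    · intro k hk
      simp only [List.length_take, List.length_drop] at hk
      have hlen : 11 < l.length := by omega
      have hlen11 : (l.take 11).length = 11 := by simp; omega
      have h1 : ¬ ((0 : Int) + (l.take 11).length + k ≤ 10) := by
        rw [hlen11]; push_cast; omega
      have h2 : (0 : Int) + (l.take 11).length + k ≤ 39 := by
        rw [hlen11]; push_cast; omega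
      simp only [h1, if_false, h2, if_true]
  have e3 : String.join ((PySem.List.enumerate ((l.drop 11).drop 29) (0 + (l.take 11).length + ((l.drop 11).take 29).length)).map fun jc =>
        if jc.2 = ' ' then String.ofList [jc.2]
        else if jc.1 ≤ 10 then "[cyan]" ++ String.ofList [jc.2] ++ "[/cyan]"
        else if jc.1 ≤ 39 then "[green]" ++ String.ofList [jc.2] ++ "[/green]"
        else "[magenta]" ++ String.ofList [jc.2] ++ "[/magenta]")
      = pvWrapSegment ((l.drop 11).drop 29) "magenta" := by
    rw [pv_join_map_enum _ _ _
        (fun c => if c = ' ' then String.ofList [c]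
                  else "[magenta]" ++ String.ofList [c] ++ "[/magenta]")]
    · unfold pvWrapSegment
      congr 1
    · intro k hk
      simp only [List.length_drop] at hk
      have hlen : 40 < l.length := by omega
      have hlen11 : (l.take 11).length = 11 := by simp; omega
      have hlen29 : ((l.drop 11).take 29).length = 29 := by simp; omega
      have h1 : ¬ ((0 : Int) + (l.take 11).length + ((l.drop 11).take 29).length + k ≤ 10) := by
        rw [hlen11, hlen29]; push_cast; omega
      have h2 : ¬ ((0 : Int) + (l.take 11).length + ((l.drop 11).take 29).length + k ≤ 39) := by
        rw [hlen11, hlen29]; push_cast; omega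
      simp only [h1, if_false, h2]
  conv_lhs => rw [hdecomp]
  rw [PySem.List.enumerate_append, PySem.List.enumerate_append,
      List.map_append, List.map_append, pv_join_append, pv_join_append,
      e1, e2, e3, String.append_assoc]
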